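-- pv_equiv track=rewrite | github.com/alliehayashi/codility-python | 3-2_PermMissingElem.py | check
-- ===== SOURCE A (Python) =====
-- def check(A):
--     N = len(A)
--     A.sort()
--     if N<0 or N>1000000:
--         return False, 0, A, 0
--
--     #the elements of A are all distinct;
--     compare = -1
--     sum = 0
--     for i in A:
--         if i == compare:
--             return False, 0, A, 0
--             break
--         else:
--             compare = i
--             sum+=i
--     return True, N, A, sum
-- ===== SOURCE B (Python) =====
-- def check(A):
--     A.sort()
--     N = len(A)
--     if N > 1000000:
--         return False, 0, A, 0
--     if len(set(A)) != N:
--         return False, 0, A, 0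
--     return True, N, A, sum(A)
-- ===== Notes on version B (the rewrite author's own statement) =====
-- stated objective: simpler
-- what changed: Replaces the sentinel-seeded adjacent-pair scan with manual accumulator by a hash-set cardinality test for distinctness plus the builtin sum, which also removes A's compare=-1 sentinel bug.
-- intended difference: On duplicate-free lists of length <= 1000000 whose minimum element is -1, A's sentinel compare=-1 falsely flags the first element as a duplicate and returns (False, 0, sorted(A), 0), while B returns the intended (True, len(A), sorted(A), sum(A)). — e.g. on check([-1, 0]): A returns (false, 0, [-1, 0], 0), B returns (true, 2, [-1, 0], -1)
import Mathlib
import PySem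

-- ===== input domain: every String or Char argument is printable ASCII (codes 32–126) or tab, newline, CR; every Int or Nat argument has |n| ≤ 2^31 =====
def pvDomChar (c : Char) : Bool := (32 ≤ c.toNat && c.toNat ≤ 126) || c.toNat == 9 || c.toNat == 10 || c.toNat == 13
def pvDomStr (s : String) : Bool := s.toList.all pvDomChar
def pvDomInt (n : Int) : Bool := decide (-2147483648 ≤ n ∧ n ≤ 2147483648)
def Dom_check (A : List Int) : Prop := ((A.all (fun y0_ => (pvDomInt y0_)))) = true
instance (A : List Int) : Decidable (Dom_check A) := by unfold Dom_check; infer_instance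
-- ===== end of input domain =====

-- B replaces A's sentinel-seeded adjacent-duplicate scan by a set-cardinality distinctness test
-- plus the builtin sum (simpler); both versions sort the argument in place in Python — the
-- equivalence proved here is about the RETURN value only.

-- ===== PORT A =====
-- the 'for i in A' loop: returns none on the early 'return False' (duplicate seen), else the sum
def checkLoop (compare sum : Int) (l : List Int) : Option Int :=
  match l with
  | [] => some sum
  | i :: rest => if i = compare then none else checkLoop i (sum + i) rest

def check (A : List Int) : Bool × Int × List Int × Int :=
  let N : Int := A.length
  let As := PySem.List.sorted A (fun x => x) false
  if N < 0 ∨ N > 1000000 then (false, 0, As, 0)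
  else
    match checkLoop (-1) 0 As with
    | none => (false, 0, As, 0)
    | some s => (true, N, As, s)

-- ===== PORT B =====
def check_alt (A : List Int) : Bool × Int × List Int × Int :=
  let As := PySem.List.sorted A (fun x => x) false
  let N : Int := As.length
  if N > 1000000 then (false, 0, As, 0)
  else if (PySem.Set.ofList As).length ≠ As.length then (false, 0, As, 0)
  else (true, N, As, As.sum)

-- ===== PRECONDITION & SPEC =====
-- On duplicate-free lists of length ≤ 1000000 whose minimum element is -1, A's sentinel
-- compare = -1 falsely flags the first element of the sorted list as a duplicate and returns
-- (false, 0, sorted A, 0); B returns the intended (true, len A, sorted A, sum A).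
def D_check (A : List Int) : Prop :=
  (-1 : Int) ∈ A ∧ (∀ x ∈ A, (-1 : Int) ≤ x) ∧ A.Nodup ∧ A.length ≤ 1000000

instance (A : List Int) : Decidable (D_check A) := by unfold D_check; infer_instance

def Spec_check (A : List Int) (out : Bool × Int × List Int × Int) : Prop :=
  ¬ D_check A → out = check_alt A
instance (A : List Int) (out : Bool × Int × List Int × Int) : Decidable (Spec_check A out) := by
  unfold Spec_check; infer_instance

def pvDiffWitness_check : List Int := [-1, 0]
def pvDiffWitnessOut_check : (Bool × Int × List Int × Int) × (Bool × Int × List Int × Int) :=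
  ((false, 0, [-1, 0], 0), (true, 2, [-1, 0], -1))

-- ===== CLAIM =====
def Claim_unchanged_check : Prop := ∀ (A : List Int), Dom_check A → Spec_check A (check A)
def Claim_changed_check : Prop :=
  Dom_check (pvDiffWitness_check) ∧ D_check (pvDiffWitness_check) ∧
  check (pvDiffWitness_check) = pvDiffWitnessOut_check.1 ∧
  check_alt (pvDiffWitness_check) = pvDiffWitnessOut_check.2 ∧
  pvDiffWitnessOut_check.1 ≠ pvDiffWitnessOut_check.2
def Claim_exact_check : Prop := ∀ (A : List Int), Dom_check A → D_check A → check A ≠ check_alt A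

-- ===== LEMMAS AND PROOFS =====

-- 1. the loop succeeds (no early return) on a strictly increasing list whose head differs from the sentinel
theorem checkLoop_some (c s : Int) (l : List Int) (hl : l.Pairwise (· < ·))
    (hc : ∀ x, l.head? = some x → c ≠ x) : checkLoop c s l = some (s + l.sum) := by
  induction l generalizing c s with
  | nil => simp [checkLoop]
  | cons i rest ih =>
    have hne : ¬ i = c := fun h => hc i rfl h.symm
    simp only [checkLoop, if_neg hne]
    have hrest : rest.Pairwise (· < ·) := (List.pairwise_cons.mp hl).2
    have hhead : ∀ x, rest.head? = some x → i ≠ x := by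
      intro x hx
      have : x ∈ rest := List.mem_of_mem_head? hx
      exact ne_of_lt ((List.pairwise_cons.mp hl).1 x this)
    rw [ih i (s + i) hrest hhead]
    simp [add_assoc, List.sum_cons]

-- 2. the loop fails immediately when the head equals the sentinel
theorem checkLoop_none (c s : Int) (l : List Int) (x : Int) (hx : l.head? = some x)
    (hcx : x = c) : checkLoop c s l = none := by
  cases l with
  | nil => simp at hx
  | cons i rest =>
    simp only [List.head?_cons, Option.some.injEq] at hx
    simp [checkLoop, hx ▸ hcx]

-- 3. the loop fails on a list with a duplicate, provided the list is sorted
theorem checkLoop_none_of_not_nodup (c s : Int) (l : List Int)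
    (hl : l.Pairwise (· ≤ ·)) (hnd : ¬ l.Nodup) : checkLoop c s l = none := by
  induction l generalizing c s with
  | nil => exact absurd List.nodup_nil hnd
  | cons i rest ih =>
    by_cases hic : i = c
    · simp [checkLoop, hic]
    · simp only [checkLoop, if_neg hic]
      have hrest : rest.Pairwise (· ≤ ·) := (List.pairwise_cons.mp hl).2
      by_cases hmem : i ∈ rest
      · cases rest with
        | nil => simp at hmem
        | cons j rest2 =>
          by_cases hij : j = i
          · simp [checkLoop, hij]
          · simp only [checkLoop, if_neg hij]
            have hji : i ≤ j := (List.pairwise_cons.mp hl).1 j (by simp)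
            have hmem2 : i ∈ rest2 := by
              rcases List.mem_cons.mp hmem with h | h
              · exact absurd h.symm hij
              · exact h
            have hje : j ≤ i := (List.pairwise_cons.mp hrest).1 i hmem2
            exact absurd (le_antisymm hje hji) hij
      · have hnd2 : ¬ rest.Nodup := fun h => hnd (List.nodup_cons.mpr ⟨hmem, h⟩)
        exact ih i (s + i) hrest hnd2

-- set(As) has the same length as Mathlib's dedup of As
theorem ofList_length_eq_dedup (l : List Int) :
    (PySem.Set.ofList l).length = l.dedup.length := by
  have hperm : (PySem.Set.ofList l).Perm l.dedup := by
    rw [List.perm_ext_iff_of_nodup (PySem.Set.nodup_ofList l) l.nodup_dedup]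
    intro a
    rw [PySem.Set.mem_ofList, List.mem_dedup]
  exact hperm.length_eq

theorem ofList_length_lt_of_not_nodup (l : List Int) (h : ¬ l.Nodup) :
    (PySem.Set.ofList l).length < l.length := by
  rw [ofList_length_eq_dedup]
  have hsub : l.dedup.Sublist l := l.dedup_sublist
  have hne : l.dedup ≠ l := fun he => h (List.dedup_eq_self.mp he)
  rcases lt_or_eq_of_le hsub.length_le with hlt | heq
  · exact hlt
  · exact absurd (hsub.eq_of_length heq) hne

theorem sorted_head_eq_neg_one (A : List Int) (hmem : (-1 : Int) ∈ A)
    (hmin : ∀ x ∈ A, (-1 : Int) ≤ x) :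
    (PySem.List.sorted A (fun x => x) false).head? = some (-1) := by
  cases hs : PySem.List.sorted A (fun x => x) false with
  | nil =>
    have : A = [] := (PySem.List.sorted_eq_nil_iff A (fun x => x) false).mp hs
    simp [this] at hmem
  | cons m t =>
    have hle : m ≤ -1 := PySem.List.key_head_sorted_le A (fun x => x) hs (-1) hmem
    have hge : -1 ≤ m := by
      have : m ∈ A := by
        rw [← PySem.List.mem_sorted A (fun x => x) false m]
        simp [hs]
      exact hmin m this
    simp [le_antisymm hle hge]

-- ===== VERDICT =====
theorem check_spec : Claim_unchanged_check := by
  intro A _ hD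
  show check A = check_alt A
  simp only [check, check_alt]
  set As := PySem.List.sorted A (fun x => x) false with hAs
  have hlenAs : As.length = A.length := by
    rw [hAs]; exact PySem.List.length_sorted A (fun x => x) false
  rw [hlenAs]
  have hpw : As.Pairwise (· ≤ ·) := by
    rw [hAs]; exact PySem.List.sorted_pairwise A (fun x => x)
  by_cases hbig : (A.length : Int) > 1000000
  · rw [if_pos (Or.inr hbig), if_pos hbig]
  · have h1 : ¬ ((A.length : Int) < 0 ∨ (A.length : Int) > 1000000) := by
      rintro (h | h)
      · exact absurd h (by simp)
      · exact hbig h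
    rw [if_neg h1, if_neg hbig]
    by_cases hnd : A.Nodup
    · have hndAs : As.Nodup := by
        rw [hAs]; exact (PySem.List.sorted_perm A (fun x => x) false).nodup_iff.mpr hnd
      rw [PySem.Set.ofList_eq_self_of_nodup As hndAs, if_neg (by simp [hlenAs])]
      have hpwlt : As.Pairwise (· < ·) :=
        (hpw.and hndAs).imp (fun h => lt_of_le_of_ne h.1 h.2)
      have hhead : ∀ x, As.head? = some x → (-1 : Int) ≠ x := by
        intro x hx hxe
        have hxA : x ∈ A := by
          rw [← PySem.List.mem_sorted A (fun x => x) false x]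
          exact hAs ▸ List.mem_of_mem_head? hx
        have hminA : ∀ y ∈ A, x ≤ y := by
          cases hAs2 : As with
          | nil => rw [hAs2] at hx; simp at hx
          | cons m t =>
            rw [hAs2] at hx
            simp only [List.head?_cons, Option.some.injEq] at hx
            intro y hy
            have := PySem.List.key_head_sorted_le A (fun x => x) (hAs ▸ hAs2) y hy
            rwa [hx] at this
        have hsz : A.length ≤ 1000000 := by exact_mod_cast not_lt.mp hbig
        exact hD ⟨hxe ▸ hxA, fun y hy => hxe ▸ hminA y hy, hnd, hsz⟩
      rw [checkLoop_some (-1) 0 As hpwlt hhead]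
      simp
    · have hndAs : ¬ As.Nodup := fun h =>
        hnd ((PySem.List.sorted_perm A (fun x => x) false).nodup_iff.mp (hAs ▸ h))
      have hcond : (PySem.Set.ofList As).length ≠ A.length := by
        rw [← hlenAs]; exact ne_of_lt (ofList_length_lt_of_not_nodup As hndAs)
      rw [checkLoop_none_of_not_nodup (-1) 0 As hpw hndAs, if_pos hcond]

theorem check_changed : Claim_changed_check := by unfold Claim_changed_check; decide

theorem check_tight : Claim_exact_check := by
  intro A _ hD heq
  rcases hD with ⟨hmem, hmin, hnd, hlen⟩
  simp only [check, check_alt] at heq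
  set As := PySem.List.sorted A (fun x => x) false with hAs
  have hlenAs : As.length = A.length := by
    rw [hAs]; exact PySem.List.length_sorted A (fun x => x) false
  rw [hlenAs] at heq
  have hbig : ¬ ((A.length : Int) > 1000000) := by
    simp only [not_lt]; exact_mod_cast hlen
  have h1 : ¬ ((A.length : Int) < 0 ∨ (A.length : Int) > 1000000) := by
    rintro (h | h)
    · exact absurd h (by simp)
    · exact hbig h
  have hndAs : As.Nodup := by
    rw [hAs]; exact (PySem.List.sorted_perm A (fun x => x) false).nodup_iff.mpr hnd
  have hhd : As.head? = some (-1) := hAs ▸ sorted_head_eq_neg_one A hmem hmin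
  rw [if_neg h1, if_neg hbig, PySem.Set.ofList_eq_self_of_nodup As hndAs,
    if_neg (by simp [hlenAs]), checkLoop_none (-1) 0 As (-1) hhd rfl] at heq
  simp at heq
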